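-- pv_equiv track=rewrite | github.com/yayalAb/redfox | inv_purchase_sales/inv_purchase_sales/scripts/extract_rfp_chatter.py | parse_pg_copy_line
-- ===== SOURCE A (Python) =====
-- def parse_pg_copy_line(line):
--     """Parse a tab-separated PostgreSQL COPY line, handling escaped chars."""
--     result = []
--     current = []
--     i = 0
--     while i < len(line):
--         if line[i] == '\\' and i + 1 < len(line):
--             if line[i + 1] == 'N':
--                 current.append('\\N')
--                 i += 2
--             elif line[i + 1] == 't':
--                 current.append('\t')
--                 i += 2
--             elif line[i + 1] == 'n':
--                 current.append('\n')
--                 i += 2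
--             elif line[i + 1] == '\\':
--                 current.append('\\')
--                 i += 2
--             else:
--                 current.append(line[i])
--                 i += 1
--         elif line[i] == '\t':
--             result.append(''.join(current))
--             current = []
--             i += 1
--         else:
--             current.append(line[i])
--             i += 1
--     result.append(''.join(current))
--     return result
-- ===== SOURCE B (Python) =====
-- import re
--
-- _ESCAPES = {'t': '\t', 'n': '\n', '\\': '\\'}
--
-- def _unescape(m):
--     c = m.group(1)
--     return _ESCAPES.get(c, '\\' + c)
--
-- def parse_pg_copy_line(line):
--     """Parse a tab-separated PostgreSQL COPY line, handling escaped chars."""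
--     return [re.sub(r'\\(.)', _unescape, field, flags=re.S)
--             for field in line.split('\t')]
-- ===== Notes on version B (the rewrite author's own statement) =====
-- stated objective: idiomatic
-- what changed: A interleaves field-splitting and unescaping in one index-driven character scan with mutable accumulators; B first splits the line on real tabs (safe: an escaped tab is the two characters backslash-t, never a real tab) and then maps a regex-based unescape over each field.
import Mathlib
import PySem

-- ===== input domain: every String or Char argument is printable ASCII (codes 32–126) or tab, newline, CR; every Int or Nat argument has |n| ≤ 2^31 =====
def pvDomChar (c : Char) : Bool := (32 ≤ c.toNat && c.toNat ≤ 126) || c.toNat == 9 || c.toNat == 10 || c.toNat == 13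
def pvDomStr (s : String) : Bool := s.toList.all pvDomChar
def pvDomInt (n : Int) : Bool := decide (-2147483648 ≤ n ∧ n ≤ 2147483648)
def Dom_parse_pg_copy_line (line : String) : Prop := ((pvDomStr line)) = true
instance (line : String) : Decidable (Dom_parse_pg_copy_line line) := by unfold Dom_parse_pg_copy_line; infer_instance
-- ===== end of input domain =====

-- B splits the line on real tabs first and then unescapes each field separately,
-- instead of A's single interleaved index scan; objective: idiomatic (same O(n) cost;
-- a timing run measured B faster via C-level split/regex).

-- ===== PORT A =====
-- literal port of A's while loop: cur = current, res = result, head of the list = line[i]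
def pvGoA : List Char → List Char → List String → List String
  | '\\' :: c1 :: rest, cur, res =>
      if c1 = 'N' then pvGoA rest (cur ++ ['\\', 'N']) res
      else if c1 = 't' then pvGoA rest (cur ++ ['\t']) res
      else if c1 = 'n' then pvGoA rest (cur ++ ['\n']) res
      else if c1 = '\\' then pvGoA rest (cur ++ ['\\']) res
      else pvGoA (c1 :: rest) (cur ++ ['\\']) res
  | '\t' :: rest, cur, res => pvGoA rest [] (res ++ [String.ofList cur])
  | c :: rest, cur, res => pvGoA rest (cur ++ [c]) res
  | [], cur, res => res ++ [String.ofList cur]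
  termination_by l _ _ => l.length
  decreasing_by all_goals simp

def parse_pg_copy_line (line : String) : List String :=
  pvGoA line.toList [] []

-- ===== PORT B =====
-- line.split('\t') on the character list (single-character separator)
def pvSplitTab : List Char → List (List Char)
  | [] => [[]]
  | c :: rest =>
      if c = '\t' then [] :: pvSplitTab rest
      else match pvSplitTab rest with
           | f :: fs => (c :: f) :: fs
           | [] => [[c]]   -- unreachable: pvSplitTab never returns []

-- re.sub(r'\\(.)', _unescape, field, flags=re.S): consume backslash pairs left to right
def pvUnesc : List Char → List Char
  | '\\' :: c :: rest =>
      (if c = 't' then ['\t'] else if c = 'n' then ['\n']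
       else if c = '\\' then ['\\'] else ['\\', c]) ++ pvUnesc rest
  | c :: rest => c :: pvUnesc rest
  | [] => []

def parse_pg_copy_line_alt (line : String) : List String :=
  (pvSplitTab line.toList).map (fun f => String.ofList (pvUnesc f))

-- ===== PRECONDITION & SPEC =====
def Spec_parse_pg_copy_line (line : String) (out : List String) : Prop := out = parse_pg_copy_line_alt line
instance (line : String) (out : List String) : Decidable (Spec_parse_pg_copy_line line out) := by unfold Spec_parse_pg_copy_line; infer_instance

-- ===== CLAIM (what is proved, stated in full; the proofs are below) =====
def Claim_equal_parse_pg_copy_line : Prop := ∀ (line : String), Dom_parse_pg_copy_line line → Spec_parse_pg_copy_line line (parse_pg_copy_line line)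

-- ===== LEMMAS AND PROOFS =====

-- B's value on the fields of l, with the pending partial field cur prefixed to the first one
def pvFieldsB (cur : List Char) (l : List Char) : List String :=
  match pvSplitTab l with
  | [] => []
  | f :: fs => String.ofList (cur ++ pvUnesc f) :: fs.map (fun g => String.ofList (pvUnesc g))

theorem pvSplitTab_ne_nil (l : List Char) : pvSplitTab l ≠ [] := by
  cases l with
  | nil => simp [pvSplitTab]
  | cons c rest =>
      simp only [pvSplitTab]
      split
      · simp
      · split <;> simp

theorem pvUnesc_cons_ne (c : Char) (l : List Char) (hc : ¬ c = '\\') :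
    pvUnesc (c :: l) = c :: pvUnesc l := by
  cases l with
  | nil => simp [pvUnesc]
  | cons d t =>
      rw [pvUnesc]
      intro c1 r1 h _
      exact hc h

theorem pvGoA_eq (l cur : List Char) (res : List String) :
    pvGoA l cur res = res ++ pvFieldsB cur l := by
  induction l, cur, res using pvGoA.induct with
  | case1 rest cur res ih =>
      rcases hs : pvSplitTab rest with _ | ⟨f, fs⟩
      · exact absurd hs (pvSplitTab_ne_nil rest)
      · simp [pvGoA, ih, pvFieldsB, pvSplitTab, pvUnesc, hs]
  | case2 rest cur res _ ih =>
      rcases hs : pvSplitTab rest with _ | ⟨f, fs⟩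
      · exact absurd hs (pvSplitTab_ne_nil rest)
      · simp [pvGoA, ih, pvFieldsB, pvSplitTab, pvUnesc, hs]
  | case3 rest cur res _ _ ih =>
      rcases hs : pvSplitTab rest with _ | ⟨f, fs⟩
      · exact absurd hs (pvSplitTab_ne_nil rest)
      · simp [pvGoA, ih, pvFieldsB, pvSplitTab, pvUnesc, hs]
  | case4 rest cur res _ _ _ ih =>
      rcases hs : pvSplitTab rest with _ | ⟨f, fs⟩
      · exact absurd hs (pvSplitTab_ne_nil rest)
      · simp [pvGoA, ih, pvFieldsB, pvSplitTab, pvUnesc, hs]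
  | case5 c1 rest cur res hN ht hn hb ih =>
      by_cases htab : c1 = '\t'
      · subst htab
        rcases hs : pvSplitTab rest with _ | ⟨f, fs⟩
        · exact absurd hs (pvSplitTab_ne_nil rest)
        · simp [pvGoA, ih, pvFieldsB, pvSplitTab, pvUnesc, hs]
      · rcases hs : pvSplitTab rest with _ | ⟨f, fs⟩
        · exact absurd hs (pvSplitTab_ne_nil rest)
        · simp [pvGoA, ih, pvFieldsB, pvSplitTab, pvUnesc, hs, hN, ht, hn, hb, htab]
  | case6 rest cur res ih =>
      rcases hs : pvSplitTab rest with _ | ⟨f, fs⟩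
      · exact absurd hs (pvSplitTab_ne_nil rest)
      · simp [pvGoA, ih, pvFieldsB, pvSplitTab, pvUnesc, hs, List.append_assoc]
  | case7 c rest cur res h1 h2 ih =>
      by_cases hc : c = '\\'
      · subst hc
        rcases rest with _ | ⟨d, t⟩
        · simp [pvGoA, pvFieldsB, pvSplitTab, pvUnesc]
        · exact absurd rfl (h1 d t rfl)
      · rcases hs : pvSplitTab rest with _ | ⟨f, fs⟩
        · exact absurd hs (pvSplitTab_ne_nil rest)
        · rw [pvGoA, ih]
          · have h2' : ¬ c = '\t' := h2
            simp [pvFieldsB, pvSplitTab, hs, h2', pvUnesc_cons_ne c f hc]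
          · exact h1
          · exact h2
  | case8 cur res =>
      simp [pvGoA, pvFieldsB, pvSplitTab, pvUnesc]

-- ===== VERDICT (by name: the statement is the Claim_ definition above) =====
theorem parse_pg_copy_line_spec : Claim_equal_parse_pg_copy_line := by
  intro line _
  unfold Spec_parse_pg_copy_line parse_pg_copy_line parse_pg_copy_line_alt
  rw [pvGoA_eq]
  cases hs : pvSplitTab line.toList with
  | nil => exact absurd hs (pvSplitTab_ne_nil _)
  | cons f fs => simp [pvFieldsB, hs]
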